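-- pv_equiv track=rewrite | github.com/ROCm/hipBLASLt | tensilelite/Tensile/Utilities/tensile_generator/tensile_config_generator.py | find_matmul_instruction
-- ===== SOURCE A (Python) =====
-- import math
--
-- def find_matmul_instruction(mfma_instruction, size, CU):
--     for m_tiles in reversed(range(1, CU+1)):
--         if size[0] // m_tiles > 256:
--             continue
--         wave_tile_m = math.ceil(size[0] // m_tiles / mfma_instruction[0])
--         if wave_tile_m <= 0:
--             continue
--         for n_tiles in reversed(range(1, CU+1)):
--             if size[1] // n_tiles > 256:
--                 continue
--             wave_tile_n = math.ceil(size[1] // n_tiles / mfma_instruction[1])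
--             if wave_tile_n <= 0:
--                 continue
--             matmul_instruction = mfma_instruction + [1, 1, 1, 1, 1]
--             for k in reversed(range(3)):
--                 if wave_tile_m // (2**k) > 0:
--                     matmul_instruction[-4] = wave_tile_m // (2**k)
--                     matmul_instruction[-2] = 2**k
--
--                     for l in reversed(range(3)):
--                         if wave_tile_n // (2**l) > 0:
--                             matmul_instruction[-3] = wave_tile_n // (2**l)
--                             matmul_instruction[-1] = 2**l
--
--                             return matmul_instruction
-- ===== SOURCE B (Python) =====
-- def find_matmul_instruction(mfma_instruction, size, CU):
--     # The two tile counts never interact, so pick each axis's largest valid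
--     # tile count in its own single scan, then split each wave tile by the
--     # largest power of two (4, 2 or 1) that leaves a nonzero quotient.
--     if CU < 1:
--         return None
--
--     def ceil_div(a, b):
--         return -(-a // b)
--
--     def largest_tiles(s, unit):
--         # largest t in [1, CU] whose per-tile extent s // t is at most 256
--         # and spans a positive number of mfma units
--         for t in range(CU, 0, -1):
--             extent = s // t
--             if extent <= 256 and ceil_div(extent, unit) > 0:
--                 return t
--         return None
--
--     m_tiles = largest_tiles(size[0], mfma_instruction[0])
--     if m_tiles is None:
--         return None
--     n_tiles = largest_tiles(size[1], mfma_instruction[1])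
--     if n_tiles is None:
--         return None
--
--     wave_tile_m = ceil_div(size[0] // m_tiles, mfma_instruction[0])
--     wave_tile_n = ceil_div(size[1] // n_tiles, mfma_instruction[1])
--
--     def wave_split(w):
--         return 4 if w >= 4 else 2 if w >= 2 else 1
--
--     k = wave_split(wave_tile_m)
--     l = wave_split(wave_tile_n)
--     return mfma_instruction + [1, wave_tile_m // k, wave_tile_n // l, k, l]
-- ===== Notes on version B (the rewrite author's own statement) =====
-- stated objective: alternative
-- what changed: A nests the n_tiles scan (and the power-of-two split loops) inside the m_tiles scan; B observes the two axes never interact and picks each axis's largest valid tile count with its own single descending scan, then chooses each wave split by a threshold comparison instead of a loop; Pre_ excludes, for CU >= 1, lists shorter than 2 and zero mfma[0]/mfma[1], shapes on which A raises IndexError/ZeroDivisionError for some scanned values and returns None for others while B's eager per-axis reads raise on more of them.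
-- outside the precondition, e.g. on find_matmul_instruction([0, 16], [600000, 16], 1): A returns None, B returns None; on find_matmul_instruction([32], [4, 567168], 128): A returns None, B raises IndexError; on find_matmul_instruction([16], [10, 10], 1): A raises IndexError, B raises IndexError
import Mathlib
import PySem

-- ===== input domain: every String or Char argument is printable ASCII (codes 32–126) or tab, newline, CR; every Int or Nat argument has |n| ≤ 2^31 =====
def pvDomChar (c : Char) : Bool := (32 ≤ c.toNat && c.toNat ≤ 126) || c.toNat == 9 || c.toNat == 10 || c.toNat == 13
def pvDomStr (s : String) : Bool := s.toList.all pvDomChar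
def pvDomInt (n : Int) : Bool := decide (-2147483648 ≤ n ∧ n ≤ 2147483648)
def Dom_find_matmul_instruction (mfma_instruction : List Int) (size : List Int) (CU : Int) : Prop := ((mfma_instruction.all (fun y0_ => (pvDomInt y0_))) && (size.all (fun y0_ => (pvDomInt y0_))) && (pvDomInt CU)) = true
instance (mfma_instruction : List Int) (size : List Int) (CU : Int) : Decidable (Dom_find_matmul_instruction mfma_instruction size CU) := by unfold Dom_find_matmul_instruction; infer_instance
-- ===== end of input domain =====

-- B replaces A's nested scans over [CU..1] (with inner power-of-two loops) by one
-- independent descending scan per axis and a closed-form wave split: the two tile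
-- counts never interact.

-- ===== PORT A =====
-- math.ceil(x / y) on ints x, y: integer ceiling division; on the admitted domain
-- (|x|, |y| ≤ 2^31 < 2^53) the correctly rounded float quotient never crosses an
-- integer, so this integer form is exact.
def pvCeil (a b : Int) : Int := -(PySem.Int.floordiv (-a) b)

-- mi[-j] = v: negative-index assignment, exact whenever 1 ≤ j ≤ len(mi)
-- (here mi always has length ≥ 5 and j ≤ 4).
def pa_setNeg (mi : List Int) (j : Nat) (v : Int) : List Int := mi.set (mi.length - j) v

-- innermost 'for l in reversed(range(3))' loop (list [2,1,0]); returns on first hit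
def pa_l (wtn : Int) (mi : List Int) : List Nat → Option (List Int)
  | [] => none
  | l :: rest =>
    if 0 < PySem.Int.floordiv wtn ((2:Int) ^ l) then
      some (pa_setNeg (pa_setNeg mi 3 (PySem.Int.floordiv wtn ((2:Int) ^ l))) 1 ((2:Int) ^ l))
    else pa_l wtn mi rest

-- 'for k in reversed(range(3))' loop; the mutated matmul_instruction is threaded through
def pa_k (wtm wtn : Int) : List Nat → List Int → Option (List Int)
  | [], _ => none
  | k :: rest, mi =>
    if 0 < PySem.Int.floordiv wtm ((2:Int) ^ k) then
      let mi' := pa_setNeg (pa_setNeg mi 4 (PySem.Int.floordiv wtm ((2:Int) ^ k))) 2 ((2:Int) ^ k)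
      match pa_l wtn mi' [2, 1, 0] with
      | some r => some r
      | none => pa_k wtm wtn rest mi'
    else pa_k wtm wtn rest mi

-- 'for n_tiles in reversed(range(1, CU+1))', rendered as the countdown counter
-- n_tiles = k+1, k = CU-1 .. 0 (reversed(range) is a lazy countdown in Python; no list
-- is materialised).  size[1], mfma[1] read via pyGetD (Pre_ keeps both indices in range,
-- so the default is never taken)
def pa_n (mfma size : List Int) (wtm : Int) : Nat → Option (List Int)
  | 0 => none
  | k + 1 =>
    if 256 < PySem.Int.floordiv (PySem.List.pyGetD size 1 0) ((k : Int) + 1) then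
      pa_n mfma size wtm k
    else
      let wtn := pvCeil (PySem.Int.floordiv (PySem.List.pyGetD size 1 0) ((k : Int) + 1)) (PySem.List.pyGetD mfma 1 0)
      if wtn ≤ 0 then pa_n mfma size wtm k
      else
        match pa_k wtm wtn [2, 1, 0] (mfma ++ [1, 1, 1, 1, 1]) with
        | some r => some r
        | none => pa_n mfma size wtm k

-- 'for m_tiles in reversed(range(1, CU+1))', same countdown rendering (m_tiles = k+1);
-- nc is the iteration count CU of the inner loop
def pa_m (mfma size : List Int) (nc : Nat) : Nat → Option (List Int)
  | 0 => none
  | k + 1 =>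
    if 256 < PySem.Int.floordiv (PySem.List.pyGetD size 0 0) ((k : Int) + 1) then
      pa_m mfma size nc k
    else
      let wtm := pvCeil (PySem.Int.floordiv (PySem.List.pyGetD size 0 0) ((k : Int) + 1)) (PySem.List.pyGetD mfma 0 0)
      if wtm ≤ 0 then pa_m mfma size nc k
      else
        match pa_n mfma size wtm nc with
        | some r => some r
        | none => pa_m mfma size nc k

def find_matmul_instruction (mfma_instruction : List Int) (size : List Int) (CU : Int) : Option (List Int) :=
  pa_m mfma_instruction size CU.toNat CU.toNat

-- ===== PORT B =====
-- ceil_div(a, b) = -(-a // b)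
def pb_ceil (a b : Int) : Int := -(PySem.Int.floordiv (-a) b)

-- largest_tiles: 'for t in range(CU, 0, -1)', the countdown t = k+1, k = CU-1 .. 0
def pb_tiles (s unit : Int) : Nat → Option Int
  | 0 => none
  | k + 1 =>
    if PySem.Int.floordiv s ((k : Int) + 1) ≤ 256 ∧
        0 < pb_ceil (PySem.Int.floordiv s ((k : Int) + 1)) unit then
      some ((k : Int) + 1)
    else pb_tiles s unit k

-- wave_split: largest power of two in {1, 2, 4} leaving a nonzero quotient
def pb_split (w : Int) : Int := if 4 ≤ w then 4 else if 2 ≤ w then 2 else 1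

def find_matmul_instruction_alt (mfma_instruction : List Int) (size : List Int) (CU : Int) : Option (List Int) :=
  if CU < 1 then none
  else
    match pb_tiles (PySem.List.pyGetD size 0 0) (PySem.List.pyGetD mfma_instruction 0 0) CU.toNat with
    | none => none
    | some m =>
      match pb_tiles (PySem.List.pyGetD size 1 0) (PySem.List.pyGetD mfma_instruction 1 0) CU.toNat with
      | none => none
      | some n =>
        let wtm := pb_ceil (PySem.Int.floordiv (PySem.List.pyGetD size 0 0) m) (PySem.List.pyGetD mfma_instruction 0 0)
        let wtn := pb_ceil (PySem.Int.floordiv (PySem.List.pyGetD size 1 0) n) (PySem.List.pyGetD mfma_instruction 1 0)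
        some (mfma_instruction ++ [1, PySem.Int.floordiv wtm (pb_split wtm), PySem.Int.floordiv wtn (pb_split wtn), pb_split wtm, pb_split wtn])

-- ===== PRECONDITION & SPEC =====
-- Pre_ excludes, for CU ≥ 1, lists of length < 2 and zero mfma[0] or mfma[1]: on those
-- shapes A raises IndexError/ZeroDivisionError for some values its scan reaches, and
-- returns None for others; B's eager per-axis reads raise on more of them, so the whole
-- shape is excluded.
def Pre_find_matmul_instruction (mfma_instruction : List Int) (size : List Int) (CU : Int) : Prop :=
  CU ≤ 0 ∨ (2 ≤ size.length ∧ 2 ≤ mfma_instruction.length ∧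
    PySem.List.pyGetD mfma_instruction 0 0 ≠ 0 ∧ PySem.List.pyGetD mfma_instruction 1 0 ≠ 0)
instance (mfma_instruction : List Int) (size : List Int) (CU : Int) : Decidable (Pre_find_matmul_instruction mfma_instruction size CU) := by unfold Pre_find_matmul_instruction; infer_instance

def pvWitness_find_matmul_instruction : List Int × List Int × Int := ([16, 16, 4, 4], [1024, 1024, 512], 104)

def Spec_find_matmul_instruction (mfma_instruction : List Int) (size : List Int) (CU : Int) (out : Option (List Int)) : Prop := out = find_matmul_instruction_alt mfma_instruction size CU
instance (mfma_instruction : List Int) (size : List Int) (CU : Int) (out : Option (List Int)) : Decidable (Spec_find_matmul_instruction mfma_instruction size CU out) := by unfold Spec_find_matmul_instruction; infer_instance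

-- ===== CLAIM (what is proved, stated in full; the proofs are below) =====
def Claim_equal_find_matmul_instruction : Prop := ∀ (mfma_instruction : List Int) (size : List Int) (CU : Int), Dom_find_matmul_instruction mfma_instruction size CU → Pre_find_matmul_instruction mfma_instruction size CU → Spec_find_matmul_instruction mfma_instruction size CU (find_matmul_instruction mfma_instruction size CU)

-- ===== LEMMAS AND PROOFS =====

-- writing into the appended [1,1,1,1,1] block
theorem setNeg5 (mfma l5 : List Int) (h5 : l5.length = 5) (j : Nat) (hj : 1 ≤ j) (hj5 : j ≤ 5)
    (v : Int) : pa_setNeg (mfma ++ l5) j v = mfma ++ l5.set (5 - j) v := by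
  unfold pa_setNeg
  rw [List.length_append, h5, List.set_append]
  rw [if_neg (by omega)]
  rw [show mfma.length + 5 - j - mfma.length = 5 - j from by omega]

-- the k/l loops in closed form: once wtm, wtn > 0 the selected factors are pb_split
theorem pa_k_eq (wtm wtn : Int) (h1 : 0 < wtm) (h2 : 0 < wtn) (mfma : List Int) :
    pa_k wtm wtn [2, 1, 0] (mfma ++ [1, 1, 1, 1, 1]) =
      some (mfma ++ [1,
        PySem.Int.floordiv wtm (pb_split wtm), PySem.Int.floordiv wtn (pb_split wtn),
        pb_split wtm, pb_split wtn]) := by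
  have r4m : 0 < wtm / 4 ↔ 4 ≤ wtm := by omega
  have r2m : 0 < wtm / 2 ↔ 2 ≤ wtm := by omega
  have r4n : 0 < wtn / 4 ↔ 4 ≤ wtn := by omega
  have r2n : 0 < wtn / 2 ↔ 2 ≤ wtn := by omega
  by_cases h4m : 4 ≤ wtm <;> by_cases h2m : 2 ≤ wtm <;>
    by_cases h4n : 4 ≤ wtn <;> by_cases h2n : 2 ≤ wtn <;>
    first
      | (exfalso; omega)
      | (simp [pa_k, pa_l, pb_split, setNeg5, show ((2:Int) ^ (2:Nat)) = 4 from rfl,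
          show ((2:Int) ^ (1:Nat)) = 2 from rfl,
          r4m, r2m, r4n, r2n, h4m, h2m, h4n, h2n, h1, h2, List.set])

-- a hit of B's scan satisfies the wave-tile positivity condition at its result
theorem pb_tiles_some_pos (s unit : Int) (cnt : Nat) (t : Int)
    (h : pb_tiles s unit cnt = some t) :
    0 < pvCeil (PySem.Int.floordiv s t) unit := by
  induction cnt with
  | zero => simp [pb_tiles] at h
  | succ k ih =>
    simp only [pb_tiles] at h
    by_cases hc : PySem.Int.floordiv s ((k : Int) + 1) ≤ 256 ∧
        0 < pb_ceil (PySem.Int.floordiv s ((k : Int) + 1)) unit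
    · rw [if_pos hc] at h
      injection h with h'
      rw [← h']
      exact hc.2
    · rw [if_neg hc] at h
      exact ih h

-- A's inner n-scan agrees, step by step, with B's n-axis scan (wtm > 0 keeps pa_k total)
theorem pa_n_eq_scan (mfma size : List Int) (wtm : Int) (hwtm : 0 < wtm) (cnt : Nat) :
    pa_n mfma size wtm cnt =
      match pb_tiles (PySem.List.pyGetD size 1 0) (PySem.List.pyGetD mfma 1 0) cnt with
      | none => none
      | some n => pa_k wtm (pvCeil (PySem.Int.floordiv (PySem.List.pyGetD size 1 0) n) (PySem.List.pyGetD mfma 1 0))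
          [2, 1, 0] (mfma ++ [1, 1, 1, 1, 1]) := by
  induction cnt with
  | zero => rfl
  | succ k ih =>
    simp only [pa_n, pb_tiles]
    by_cases hg : 256 < PySem.Int.floordiv (PySem.List.pyGetD size 1 0) ((k : Int) + 1)
    · rw [if_pos hg, if_neg (by intro hc; exact absurd hc.1 (by omega))]
      exact ih
    · rw [if_neg hg]
      by_cases hc : pvCeil (PySem.Int.floordiv (PySem.List.pyGetD size 1 0) ((k : Int) + 1)) (PySem.List.pyGetD mfma 1 0) ≤ 0
      · rw [if_pos hc, if_neg (by intro hq; exact absurd hq.2 (by unfold pb_ceil; unfold pvCeil at hc; omega))]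
        exact ih
      · rw [if_neg hc, if_pos ⟨by omega, by unfold pb_ceil; unfold pvCeil at hc; omega⟩]
        dsimp only
        rw [pa_k_eq wtm _ hwtm (by omega) mfma]

-- if no wtm > 0 makes the inner loop return, the outer loop falls through
theorem pa_m_none_of_n_none (mfma size : List Int) (nc : Nat) (mm : Nat)
    (h : ∀ wtm, 0 < wtm → pa_n mfma size wtm nc = none) :
    pa_m mfma size nc mm = none := by
  induction mm with
  | zero => rfl
  | succ k ih =>
    simp only [pa_m]
    by_cases hg : 256 < PySem.Int.floordiv (PySem.List.pyGetD size 0 0) ((k : Int) + 1)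
    · rw [if_pos hg]; exact ih
    · by_cases hc : pvCeil (PySem.Int.floordiv (PySem.List.pyGetD size 0 0) ((k : Int) + 1)) (PySem.List.pyGetD mfma 0 0) ≤ 0
      · rw [if_neg hg, if_pos hc]; exact ih
      · rw [if_neg hg, if_neg hc, h _ (by omega)]; exact ih

-- A's outer m-scan agrees with B's m-axis scan when the inner loop resolves to 'ans wtm'
theorem pa_m_eq_scan (mfma size : List Int) (nc : Nat) (ans : Int → List Int)
    (hn : ∀ wtm, 0 < wtm → pa_n mfma size wtm nc = some (ans wtm)) (cnt : Nat) :
    pa_m mfma size nc cnt =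
      match pb_tiles (PySem.List.pyGetD size 0 0) (PySem.List.pyGetD mfma 0 0) cnt with
      | none => none
      | some m => some (ans (pvCeil (PySem.Int.floordiv (PySem.List.pyGetD size 0 0) m) (PySem.List.pyGetD mfma 0 0))) := by
  induction cnt with
  | zero => rfl
  | succ k ih =>
    simp only [pa_m, pb_tiles]
    by_cases hg : 256 < PySem.Int.floordiv (PySem.List.pyGetD size 0 0) ((k : Int) + 1)
    · rw [if_pos hg, if_neg (by intro hc; exact absurd hc.1 (by omega))]
      exact ih
    · rw [if_neg hg]
      by_cases hc : pvCeil (PySem.Int.floordiv (PySem.List.pyGetD size 0 0) ((k : Int) + 1)) (PySem.List.pyGetD mfma 0 0) ≤ 0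
      · rw [if_pos hc, if_neg (by intro hq; exact absurd hq.2 (by unfold pb_ceil; unfold pvCeil at hc; omega))]
        exact ih
      · rw [if_neg hc, if_pos ⟨by omega, by unfold pb_ceil; unfold pvCeil at hc; omega⟩]
        rw [hn _ (by omega)]

-- the main equivalence, CU ≥ 1
theorem main_equiv (mfma size : List Int) (CU : Int) (hCU : 1 ≤ CU) :
    find_matmul_instruction mfma size CU = find_matmul_instruction_alt mfma size CU := by
  unfold find_matmul_instruction find_matmul_instruction_alt
  rw [if_neg (by omega)]
  cases hn : pb_tiles (PySem.List.pyGetD size 1 0) (PySem.List.pyGetD mfma 1 0) CU.toNat with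
  | none =>
    have hnone : ∀ wtm, 0 < wtm → pa_n mfma size wtm CU.toNat = none := by
      intro wtm hwtm
      rw [pa_n_eq_scan mfma size wtm hwtm CU.toNat, hn]
    rw [pa_m_none_of_n_none mfma size CU.toNat CU.toNat hnone]
    cases pb_tiles (PySem.List.pyGetD size 0 0) (PySem.List.pyGetD mfma 0 0) CU.toNat <;> rfl
  | some n =>
    have hwtn : 0 < pvCeil (PySem.Int.floordiv (PySem.List.pyGetD size 1 0) n) (PySem.List.pyGetD mfma 1 0) :=
      pb_tiles_some_pos _ _ _ _ hn
    set wtnv := pvCeil (PySem.Int.floordiv (PySem.List.pyGetD size 1 0) n) (PySem.List.pyGetD mfma 1 0) with hwtnv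
    set ans : Int → List Int := fun wtm =>
      mfma ++ [1, PySem.Int.floordiv wtm (pb_split wtm), PySem.Int.floordiv wtnv (pb_split wtnv),
        pb_split wtm, pb_split wtnv] with hans
    have hnsome : ∀ wtm, 0 < wtm → pa_n mfma size wtm CU.toNat = some (ans wtm) := by
      intro wtm hwtm
      rw [pa_n_eq_scan mfma size wtm hwtm CU.toNat, hn]
      exact pa_k_eq wtm wtnv hwtm hwtn mfma
    rw [pa_m_eq_scan mfma size CU.toNat ans hnsome CU.toNat]
    cases pb_tiles (PySem.List.pyGetD size 0 0) (PySem.List.pyGetD mfma 0 0) CU.toNat <;> rfl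

-- ===== VERDICT (by name: the statement is the Claim_ definition above) =====
theorem find_matmul_instruction_spec : Claim_equal_find_matmul_instruction := by
  intro mfma size CU _ _
  unfold Spec_find_matmul_instruction
  by_cases hCU : CU < 1
  · unfold find_matmul_instruction find_matmul_instruction_alt
    rw [show CU.toNat = 0 from by omega, if_pos hCU]
    rfl
  · exact main_equiv mfma size CU (by omega)
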